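-- pv_equiv track=rewrite | github.com/fondazionegolin/GolinelliAIPlayground | scripts/generate_git_changelog.py | normalize_commit
-- ===== SOURCE A (Python) =====
-- def normalize_commit(subject: str) -> dict:
--     lower = subject.lower().strip()
--     category = "improved"
--     if lower.startswith(("feat:", "feature:", "add:", "new:")):
--         category = "new"
--     elif lower.startswith(("fix:", "bugfix:", "hotfix:")):
--         category = "fixed"
--
--     cleaned = subject
--     for prefix in ("feat:", "feature:", "add:", "new:", "fix:", "bugfix:", "hotfix:", "chore:", "refactor:"):
--         if lower.startswith(prefix):
--             cleaned = subject[len(prefix):].strip()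
--             break
--
--     title = cleaned[:1].upper() + cleaned[1:] if cleaned else "Aggiornamento piattaforma"
--     return {
--         "category": category,
--         "title": title,
--         "description": title,
--     }
-- ===== SOURCE B (Python) =====
-- # Parse-then-lookup: split the subject at its first colon and look the leading token up
-- # in a keyword->category dict, instead of scanning a tuple of prefixes with startswith.
-- _CATS = {
--     "feat": "new", "feature": "new", "add": "new", "new": "new",
--     "fix": "fixed", "bugfix": "fixed", "hotfix": "fixed",
--     "chore": "improved", "refactor": "improved",
-- }
--
-- def normalize_commit(subject: str) -> dict:
--     lower = subject.lower().strip()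
--     i = lower.find(":")
--     cat = _CATS.get(lower[:i]) if i >= 0 else None
--     if cat is None:
--         category, cleaned = "improved", subject
--     else:
--         category, cleaned = cat, subject[i + 1:].strip()
--     title = cleaned[:1].upper() + cleaned[1:] if cleaned else "Aggiornamento piattaforma"
--     return {"category": category, "title": title, "description": title}
-- ===== Notes on version B (the rewrite author's own statement) =====
-- stated objective: alternative
-- what changed: B parses the subject instead of scanning prefixes: it splits the lowered subject at its first colon and looks the leading token up once in a keyword-to-category dict, replacing A's two tuple-startswith tests plus the separate 9-prefix cleaning loop.
import Mathlib
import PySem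

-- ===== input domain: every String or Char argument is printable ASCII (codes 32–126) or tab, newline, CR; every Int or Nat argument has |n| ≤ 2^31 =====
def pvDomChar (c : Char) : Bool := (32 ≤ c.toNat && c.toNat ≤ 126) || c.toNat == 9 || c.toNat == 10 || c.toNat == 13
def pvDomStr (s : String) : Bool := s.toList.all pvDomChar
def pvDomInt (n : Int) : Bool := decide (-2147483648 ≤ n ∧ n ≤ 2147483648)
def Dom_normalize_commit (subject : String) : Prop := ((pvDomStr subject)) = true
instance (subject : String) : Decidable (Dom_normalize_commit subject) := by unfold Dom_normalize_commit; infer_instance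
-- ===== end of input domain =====

-- B parses the subject (split at the first colon and look the token up in a keyword→category dict)
-- instead of A's tuple-startswith tests plus a 9-prefix cleaning loop (objective: alternative).

-- ===== PORT A =====
-- the 'for prefix in (...)' cleaning loop with break: first matching prefix wins
def nc_cleanLoop (subject lower : String) : List String → String
  | [] => subject
  | p :: ps =>
    if PySem.Str.startswith lower p then
      PySem.Str.strip (PySem.Str.slice subject (some (PySem.Str.len p)) none)
    else nc_cleanLoop subject lower ps

def normalize_commit (subject : String) : List (String × String) :=
  let lower := PySem.Str.strip (PySem.Str.lower subject)
  let category :=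
    if PySem.Str.startswith lower "feat:" || PySem.Str.startswith lower "feature:" ||
       PySem.Str.startswith lower "add:" || PySem.Str.startswith lower "new:" then "new"
    else if PySem.Str.startswith lower "fix:" || PySem.Str.startswith lower "bugfix:" ||
       PySem.Str.startswith lower "hotfix:" then "fixed"
    else "improved"
  let cleaned := nc_cleanLoop subject lower
    ["feat:", "feature:", "add:", "new:", "fix:", "bugfix:", "hotfix:", "chore:", "refactor:"]
  let title :=
    if cleaned ≠ "" then
      PySem.Str.upper (PySem.Str.slice cleaned none (some 1)) ++ PySem.Str.slice cleaned (some 1) none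
    else "Aggiornamento piattaforma"
  [("category", category), ("title", title), ("description", title)]

-- ===== PORT B =====
-- the _CATS dict literal of Source B
def nc_cats : PySem.Dict String String :=
  PySem.Dict.ofList
    [("feat", "new"), ("feature", "new"), ("add", "new"), ("new", "new"),
     ("fix", "fixed"), ("bugfix", "fixed"), ("hotfix", "fixed"),
     ("chore", "improved"), ("refactor", "improved")]

def normalize_commit_alt (subject : String) : List (String × String) :=
  let lower := PySem.Str.strip (PySem.Str.lower subject)
  let i := PySem.Str.find lower ":"
  let cat : Option String :=
    if 0 ≤ i then nc_cats.get? (PySem.Str.slice lower none (some i)) else none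
  let cc : String × String :=
    match cat with
    | none => ("improved", subject)
    | some c => (c, PySem.Str.strip (PySem.Str.slice subject (some (i + 1)) none))
  let title :=
    if cc.2 ≠ "" then
      PySem.Str.upper (PySem.Str.slice cc.2 none (some 1)) ++ PySem.Str.slice cc.2 (some 1) none
    else "Aggiornamento piattaforma"
  [("category", cc.1), ("title", title), ("description", title)]

-- ===== PRECONDITION & SPEC =====
def Spec_normalize_commit (subject : String) (out : List (String × String)) : Prop := out = normalize_commit_alt subject
instance (subject : String) (out : List (String × String)) : Decidable (Spec_normalize_commit subject out) := by unfold Spec_normalize_commit; infer_instance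

-- ===== CLAIM (what is proved, stated in full; the proofs are below) =====
def Claim_equal_normalize_commit : Prop := ∀ (subject : String), Dom_normalize_commit subject → Spec_normalize_commit subject (normalize_commit subject)

-- ===== LEMMAS AND PROOFS =====

lemma nc_sw_iff (L w : List Char) (hw : ':' ∉ w) :
    PySem.Chars.startswith L (w ++ [':']) = true ↔ (':' ∈ L ∧ L.takeWhile (fun c => c ≠ ':') = w) := by
  rw [PySem.Chars.startswith_iff]
  constructor
  · rintro ⟨t, rfl⟩
    refine ⟨by simp, ?_⟩
    rw [List.append_assoc, List.takeWhile_append_of_pos (by intro c hcw; simp; rintro rfl; exact hw hcw)]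
    simp
  · rintro ⟨hc, hW⟩
    have hsplit := List.takeWhile_append_dropWhile (p := fun c => c ≠ ':') (l := L)
    have hne : L.dropWhile (fun c => c ≠ ':') ≠ [] := by
      intro h
      rw [h, List.append_nil] at hsplit
      have := List.mem_takeWhile_imp (l := L) (p := fun c => c ≠ ':') (hsplit ▸ hc)
      simp at this
    obtain ⟨a, t2, hat⟩ : ∃ a t2, L.dropWhile (fun c => c ≠ ':') = a :: t2 := by
      cases h : L.dropWhile (fun c => c ≠ ':') with
      | nil => exact absurd h hne
      | cons a t2 => exact ⟨a, t2, rfl⟩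
    have hhead : a = ':' := by
      have := List.head_dropWhile_not (fun c => c ≠ ':') hne
      simp only [hat, List.head_cons] at this
      simpa using this
    refine ⟨t2, ?_⟩
    rw [← hW]
    conv_rhs => rw [← hsplit]
    rw [hat, hhead]
    simp

lemma nc_tw_len (L : List Char) (j : Nat) (h2 : L[j]? = some ':') (h1 : ∀ i < j, L[i]? ≠ some ':') :
    (L.takeWhile (fun c => c ≠ ':')).length = j := by
  induction L generalizing j with
  | nil => simp at h2
  | cons a t ih =>
    cases j with
    | zero => simp_all [List.takeWhile]
    | succ j' =>
      have ha : a ≠ ':' := by have := h1 0 (by omega); simpa using this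
      have := ih j' (by simpa using h2) (fun i hi => by have := h1 (i+1) (by omega); simpa using this)
      simp only [List.takeWhile_cons, decide_not] at this ⊢
      simp [ha, this]

lemma nc_find_mem (L : List Char) (hc : ':' ∈ L) :
    PySem.Chars.find L [':'] = ((L.takeWhile (fun c => c ≠ ':')).length : Int) := by
  have hinf : [':'] <:+: L := (List.singleton_infix_iff ':' L).mpr hc
  have h0 : 0 ≤ PySem.Chars.find L [':'] := (PySem.Chars.find_nonneg_iff L [':']).mpr hinf
  obtain ⟨hp, hmin⟩ := PySem.Chars.find_spec h0
  have h2 : L[(PySem.Chars.find L [':']).toNat]? = some ':' := by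
    rw [← List.head?_drop]
    obtain ⟨t, ht⟩ := hp
    rw [← ht]; rfl
  have h1 : ∀ i < (PySem.Chars.find L [':']).toNat, L[i]? ≠ some ':' := by
    intro i hi h
    rw [← List.head?_drop] at h
    refine hmin i hi ?_
    cases hd : L.drop i with
    | nil => rw [hd] at h; simp at h
    | cons a t =>
      rw [hd] at h
      simp only [List.head?_cons, Option.some.injEq] at h
      rw [h]
      exact ⟨t, rfl⟩
  rw [nc_tw_len L _ h2 h1, Int.toNat_of_nonneg h0]

lemma nc_find_not_mem (L : List Char) (hc : ':' ∉ L) : PySem.Chars.find L [':'] = -1 :=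
  (PySem.Chars.find_eq_neg_one_iff L [':']).mpr (fun h => hc ((List.singleton_infix_iff ':' L).mp h))

theorem nc_main (subject : String) : normalize_commit subject = normalize_commit_alt subject := by
  unfold normalize_commit normalize_commit_alt
  set lo := PySem.Str.strip (PySem.Str.lower subject) with hlo
  by_cases hc : ':' ∈ lo.toList
  case neg =>
    have hf : PySem.Str.find lo ":" = -1 := by
      rw [PySem.Str.find_eq]; exact nc_find_not_mem lo.toList hc
    have en0 : PySem.Str.startswith lo "feat:" = false := by
      rw [PySem.Str.startswith_eq]
      rw [Bool.eq_false_iff]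
      intro h
      exact hc ((nc_sw_iff lo.toList "feat".toList (by decide)).mp h).1
    have en1 : PySem.Str.startswith lo "feature:" = false := by
      rw [PySem.Str.startswith_eq]
      rw [Bool.eq_false_iff]
      intro h
      exact hc ((nc_sw_iff lo.toList "feature".toList (by decide)).mp h).1
    have en2 : PySem.Str.startswith lo "add:" = false := by
      rw [PySem.Str.startswith_eq]
      rw [Bool.eq_false_iff]
      intro h
      exact hc ((nc_sw_iff lo.toList "add".toList (by decide)).mp h).1
    have en3 : PySem.Str.startswith lo "new:" = false := by
      rw [PySem.Str.startswith_eq]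
      rw [Bool.eq_false_iff]
      intro h
      exact hc ((nc_sw_iff lo.toList "new".toList (by decide)).mp h).1
    have en4 : PySem.Str.startswith lo "fix:" = false := by
      rw [PySem.Str.startswith_eq]
      rw [Bool.eq_false_iff]
      intro h
      exact hc ((nc_sw_iff lo.toList "fix".toList (by decide)).mp h).1
    have en5 : PySem.Str.startswith lo "bugfix:" = false := by
      rw [PySem.Str.startswith_eq]
      rw [Bool.eq_false_iff]
      intro h
      exact hc ((nc_sw_iff lo.toList "bugfix".toList (by decide)).mp h).1
    have en6 : PySem.Str.startswith lo "hotfix:" = false := by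
      rw [PySem.Str.startswith_eq]
      rw [Bool.eq_false_iff]
      intro h
      exact hc ((nc_sw_iff lo.toList "hotfix".toList (by decide)).mp h).1
    have en7 : PySem.Str.startswith lo "chore:" = false := by
      rw [PySem.Str.startswith_eq]
      rw [Bool.eq_false_iff]
      intro h
      exact hc ((nc_sw_iff lo.toList "chore".toList (by decide)).mp h).1
    have en8 : PySem.Str.startswith lo "refactor:" = false := by
      rw [PySem.Str.startswith_eq]
      rw [Bool.eq_false_iff]
      intro h
      exact hc ((nc_sw_iff lo.toList "refactor".toList (by decide)).mp h).1
    simp only [hf, en0, en1, en2, en3, en4, en5, en6, en7, en8, nc_cleanLoop]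
    norm_num
  case pos =>
    have hf : PySem.Str.find lo ":" = ((lo.toList.takeWhile (fun c => c ≠ ':')).length : Int) := by
      rw [PySem.Str.find_eq]; exact nc_find_mem lo.toList hc
    set W := lo.toList.takeWhile (fun c => c ≠ ':') with hWdef
    have hword : (PySem.Str.slice lo none (some ((W.length : Int)))).toList = W := by
      have hp : W <+: lo.toList := hWdef ▸ List.takeWhile_prefix _
      have ht := List.prefix_iff_eq_take.mp hp
      simp only [PySem.Str.toList_slice, PySem.Chars.slice_eq_listSlice, PySem.List.slice_to_natCast]
      exact ht.symm
    have swT : ∀ w : List Char, ':' ∉ w → W = w → PySem.Chars.startswith lo.toList (w ++ [':']) = true :=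
      fun w hw hWw => (nc_sw_iff lo.toList w hw).mpr ⟨hc, hWdef ▸ hWw⟩
    have swF : ∀ w : List Char, ':' ∉ w → W ≠ w → PySem.Chars.startswith lo.toList (w ++ [':']) = false :=
      fun w hw hne => by
        rw [Bool.eq_false_iff]
        intro h
        exact hne (hWdef.trans ((nc_sw_iff lo.toList w hw).mp h).2)
    by_cases hk0 : W = "feat".toList
    · have e0 : PySem.Str.startswith lo "feat:" = true := by
        rw [PySem.Str.startswith_eq]
        exact swT "feat".toList (by decide) hk0
      have e1 : PySem.Str.startswith lo "feature:" = false := by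
        rw [PySem.Str.startswith_eq]
        exact swF "feature".toList (by decide) (by rw [hk0]; decide)
      have e2 : PySem.Str.startswith lo "add:" = false := by
        rw [PySem.Str.startswith_eq]
        exact swF "add".toList (by decide) (by rw [hk0]; decide)
      have e3 : PySem.Str.startswith lo "new:" = false := by
        rw [PySem.Str.startswith_eq]
        exact swF "new".toList (by decide) (by rw [hk0]; decide)
      have e4 : PySem.Str.startswith lo "fix:" = false := by
        rw [PySem.Str.startswith_eq]
        exact swF "fix".toList (by decide) (by rw [hk0]; decide)
      have e5 : PySem.Str.startswith lo "bugfix:" = false := by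
        rw [PySem.Str.startswith_eq]
        exact swF "bugfix".toList (by decide) (by rw [hk0]; decide)
      have e6 : PySem.Str.startswith lo "hotfix:" = false := by
        rw [PySem.Str.startswith_eq]
        exact swF "hotfix".toList (by decide) (by rw [hk0]; decide)
      have e7 : PySem.Str.startswith lo "chore:" = false := by
        rw [PySem.Str.startswith_eq]
        exact swF "chore".toList (by decide) (by rw [hk0]; decide)
      have e8 : PySem.Str.startswith lo "refactor:" = false := by
        rw [PySem.Str.startswith_eq]
        exact swF "refactor".toList (by decide) (by rw [hk0]; decide)
      have hfn : PySem.Str.find lo ":" = (4 : Int) := by rw [hf, hk0]; decide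
      have hweq : PySem.Str.slice lo none (some ((4 : Int))) = "feat" := by
        apply String.toList_inj.mp
        rw [show ((4 : Int)) = ((W.length : Int)) from by rw [hk0]; decide, hword, hk0]
      have eg : nc_cats.get? (PySem.Str.slice lo none (some ((4 : Int)))) = some "new" := by
        rw [hweq]; rfl
      have hlp : PySem.Str.len "feat:" = (5 : Int) := by decide
      have hplus : ((4 : Int)) + 1 = (5 : Int) := by decide
      simp only [hfn, e0, e1, e2, e3, e4, e5, e6, e7, e8, eg, nc_cleanLoop, hlp, hplus]
      norm_num
    by_cases hk1 : W = "feature".toList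
    · have e0 : PySem.Str.startswith lo "feat:" = false := by
        rw [PySem.Str.startswith_eq]
        exact swF "feat".toList (by decide) (by rw [hk1]; decide)
      have e1 : PySem.Str.startswith lo "feature:" = true := by
        rw [PySem.Str.startswith_eq]
        exact swT "feature".toList (by decide) hk1
      have e2 : PySem.Str.startswith lo "add:" = false := by
        rw [PySem.Str.startswith_eq]
        exact swF "add".toList (by decide) (by rw [hk1]; decide)
      have e3 : PySem.Str.startswith lo "new:" = false := by
        rw [PySem.Str.startswith_eq]
        exact swF "new".toList (by decide) (by rw [hk1]; decide)
      have e4 : PySem.Str.startswith lo "fix:" = false := by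
        rw [PySem.Str.startswith_eq]
        exact swF "fix".toList (by decide) (by rw [hk1]; decide)
      have e5 : PySem.Str.startswith lo "bugfix:" = false := by
        rw [PySem.Str.startswith_eq]
        exact swF "bugfix".toList (by decide) (by rw [hk1]; decide)
      have e6 : PySem.Str.startswith lo "hotfix:" = false := by
        rw [PySem.Str.startswith_eq]
        exact swF "hotfix".toList (by decide) (by rw [hk1]; decide)
      have e7 : PySem.Str.startswith lo "chore:" = false := by
        rw [PySem.Str.startswith_eq]
        exact swF "chore".toList (by decide) (by rw [hk1]; decide)
      have e8 : PySem.Str.startswith lo "refactor:" = false := by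
        rw [PySem.Str.startswith_eq]
        exact swF "refactor".toList (by decide) (by rw [hk1]; decide)
      have hfn : PySem.Str.find lo ":" = (7 : Int) := by rw [hf, hk1]; decide
      have hweq : PySem.Str.slice lo none (some ((7 : Int))) = "feature" := by
        apply String.toList_inj.mp
        rw [show ((7 : Int)) = ((W.length : Int)) from by rw [hk1]; decide, hword, hk1]
      have eg : nc_cats.get? (PySem.Str.slice lo none (some ((7 : Int)))) = some "new" := by
        rw [hweq]; rfl
      have hlp : PySem.Str.len "feature:" = (8 : Int) := by decide
      have hplus : ((7 : Int)) + 1 = (8 : Int) := by decide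
      simp only [hfn, e0, e1, e2, e3, e4, e5, e6, e7, e8, eg, nc_cleanLoop, hlp, hplus]
      norm_num
    by_cases hk2 : W = "add".toList
    · have e0 : PySem.Str.startswith lo "feat:" = false := by
        rw [PySem.Str.startswith_eq]
        exact swF "feat".toList (by decide) (by rw [hk2]; decide)
      have e1 : PySem.Str.startswith lo "feature:" = false := by
        rw [PySem.Str.startswith_eq]
        exact swF "feature".toList (by decide) (by rw [hk2]; decide)
      have e2 : PySem.Str.startswith lo "add:" = true := by
        rw [PySem.Str.startswith_eq]
        exact swT "add".toList (by decide) hk2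
      have e3 : PySem.Str.startswith lo "new:" = false := by
        rw [PySem.Str.startswith_eq]
        exact swF "new".toList (by decide) (by rw [hk2]; decide)
      have e4 : PySem.Str.startswith lo "fix:" = false := by
        rw [PySem.Str.startswith_eq]
        exact swF "fix".toList (by decide) (by rw [hk2]; decide)
      have e5 : PySem.Str.startswith lo "bugfix:" = false := by
        rw [PySem.Str.startswith_eq]
        exact swF "bugfix".toList (by decide) (by rw [hk2]; decide)
      have e6 : PySem.Str.startswith lo "hotfix:" = false := by
        rw [PySem.Str.startswith_eq]
        exact swF "hotfix".toList (by decide) (by rw [hk2]; decide)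
      have e7 : PySem.Str.startswith lo "chore:" = false := by
        rw [PySem.Str.startswith_eq]
        exact swF "chore".toList (by decide) (by rw [hk2]; decide)
      have e8 : PySem.Str.startswith lo "refactor:" = false := by
        rw [PySem.Str.startswith_eq]
        exact swF "refactor".toList (by decide) (by rw [hk2]; decide)
      have hfn : PySem.Str.find lo ":" = (3 : Int) := by rw [hf, hk2]; decide
      have hweq : PySem.Str.slice lo none (some ((3 : Int))) = "add" := by
        apply String.toList_inj.mp
        rw [show ((3 : Int)) = ((W.length : Int)) from by rw [hk2]; decide, hword, hk2]
      have eg : nc_cats.get? (PySem.Str.slice lo none (some ((3 : Int)))) = some "new" := by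
        rw [hweq]; rfl
      have hlp : PySem.Str.len "add:" = (4 : Int) := by decide
      have hplus : ((3 : Int)) + 1 = (4 : Int) := by decide
      simp only [hfn, e0, e1, e2, e3, e4, e5, e6, e7, e8, eg, nc_cleanLoop, hlp, hplus]
      norm_num
    by_cases hk3 : W = "new".toList
    · have e0 : PySem.Str.startswith lo "feat:" = false := by
        rw [PySem.Str.startswith_eq]
        exact swF "feat".toList (by decide) (by rw [hk3]; decide)
      have e1 : PySem.Str.startswith lo "feature:" = false := by
        rw [PySem.Str.startswith_eq]
        exact swF "feature".toList (by decide) (by rw [hk3]; decide)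
      have e2 : PySem.Str.startswith lo "add:" = false := by
        rw [PySem.Str.startswith_eq]
        exact swF "add".toList (by decide) (by rw [hk3]; decide)
      have e3 : PySem.Str.startswith lo "new:" = true := by
        rw [PySem.Str.startswith_eq]
        exact swT "new".toList (by decide) hk3
      have e4 : PySem.Str.startswith lo "fix:" = false := by
        rw [PySem.Str.startswith_eq]
        exact swF "fix".toList (by decide) (by rw [hk3]; decide)
      have e5 : PySem.Str.startswith lo "bugfix:" = false := by
        rw [PySem.Str.startswith_eq]
        exact swF "bugfix".toList (by decide) (by rw [hk3]; decide)
      have e6 : PySem.Str.startswith lo "hotfix:" = false := by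
        rw [PySem.Str.startswith_eq]
        exact swF "hotfix".toList (by decide) (by rw [hk3]; decide)
      have e7 : PySem.Str.startswith lo "chore:" = false := by
        rw [PySem.Str.startswith_eq]
        exact swF "chore".toList (by decide) (by rw [hk3]; decide)
      have e8 : PySem.Str.startswith lo "refactor:" = false := by
        rw [PySem.Str.startswith_eq]
        exact swF "refactor".toList (by decide) (by rw [hk3]; decide)
      have hfn : PySem.Str.find lo ":" = (3 : Int) := by rw [hf, hk3]; decide
      have hweq : PySem.Str.slice lo none (some ((3 : Int))) = "new" := by
        apply String.toList_inj.mp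
        rw [show ((3 : Int)) = ((W.length : Int)) from by rw [hk3]; decide, hword, hk3]
      have eg : nc_cats.get? (PySem.Str.slice lo none (some ((3 : Int)))) = some "new" := by
        rw [hweq]; rfl
      have hlp : PySem.Str.len "new:" = (4 : Int) := by decide
      have hplus : ((3 : Int)) + 1 = (4 : Int) := by decide
      simp only [hfn, e0, e1, e2, e3, e4, e5, e6, e7, e8, eg, nc_cleanLoop, hlp, hplus]
      norm_num
    by_cases hk4 : W = "fix".toList
    · have e0 : PySem.Str.startswith lo "feat:" = false := by
        rw [PySem.Str.startswith_eq]
        exact swF "feat".toList (by decide) (by rw [hk4]; decide)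
      have e1 : PySem.Str.startswith lo "feature:" = false := by
        rw [PySem.Str.startswith_eq]
        exact swF "feature".toList (by decide) (by rw [hk4]; decide)
      have e2 : PySem.Str.startswith lo "add:" = false := by
        rw [PySem.Str.startswith_eq]
        exact swF "add".toList (by decide) (by rw [hk4]; decide)
      have e3 : PySem.Str.startswith lo "new:" = false := by
        rw [PySem.Str.startswith_eq]
        exact swF "new".toList (by decide) (by rw [hk4]; decide)
      have e4 : PySem.Str.startswith lo "fix:" = true := by
        rw [PySem.Str.startswith_eq]
        exact swT "fix".toList (by decide) hk4
      have e5 : PySem.Str.startswith lo "bugfix:" = false := by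
        rw [PySem.Str.startswith_eq]
        exact swF "bugfix".toList (by decide) (by rw [hk4]; decide)
      have e6 : PySem.Str.startswith lo "hotfix:" = false := by
        rw [PySem.Str.startswith_eq]
        exact swF "hotfix".toList (by decide) (by rw [hk4]; decide)
      have e7 : PySem.Str.startswith lo "chore:" = false := by
        rw [PySem.Str.startswith_eq]
        exact swF "chore".toList (by decide) (by rw [hk4]; decide)
      have e8 : PySem.Str.startswith lo "refactor:" = false := by
        rw [PySem.Str.startswith_eq]
        exact swF "refactor".toList (by decide) (by rw [hk4]; decide)
      have hfn : PySem.Str.find lo ":" = (3 : Int) := by rw [hf, hk4]; decide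
      have hweq : PySem.Str.slice lo none (some ((3 : Int))) = "fix" := by
        apply String.toList_inj.mp
        rw [show ((3 : Int)) = ((W.length : Int)) from by rw [hk4]; decide, hword, hk4]
      have eg : nc_cats.get? (PySem.Str.slice lo none (some ((3 : Int)))) = some "fixed" := by
        rw [hweq]; rfl
      have hlp : PySem.Str.len "fix:" = (4 : Int) := by decide
      have hplus : ((3 : Int)) + 1 = (4 : Int) := by decide
      simp only [hfn, e0, e1, e2, e3, e4, e5, e6, e7, e8, eg, nc_cleanLoop, hlp, hplus]
      norm_num
    by_cases hk5 : W = "bugfix".toList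
    · have e0 : PySem.Str.startswith lo "feat:" = false := by
        rw [PySem.Str.startswith_eq]
        exact swF "feat".toList (by decide) (by rw [hk5]; decide)
      have e1 : PySem.Str.startswith lo "feature:" = false := by
        rw [PySem.Str.startswith_eq]
        exact swF "feature".toList (by decide) (by rw [hk5]; decide)
      have e2 : PySem.Str.startswith lo "add:" = false := by
        rw [PySem.Str.startswith_eq]
        exact swF "add".toList (by decide) (by rw [hk5]; decide)
      have e3 : PySem.Str.startswith lo "new:" = false := by
        rw [PySem.Str.startswith_eq]
        exact swF "new".toList (by decide) (by rw [hk5]; decide)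
      have e4 : PySem.Str.startswith lo "fix:" = false := by
        rw [PySem.Str.startswith_eq]
        exact swF "fix".toList (by decide) (by rw [hk5]; decide)
      have e5 : PySem.Str.startswith lo "bugfix:" = true := by
        rw [PySem.Str.startswith_eq]
        exact swT "bugfix".toList (by decide) hk5
      have e6 : PySem.Str.startswith lo "hotfix:" = false := by
        rw [PySem.Str.startswith_eq]
        exact swF "hotfix".toList (by decide) (by rw [hk5]; decide)
      have e7 : PySem.Str.startswith lo "chore:" = false := by
        rw [PySem.Str.startswith_eq]
        exact swF "chore".toList (by decide) (by rw [hk5]; decide)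
      have e8 : PySem.Str.startswith lo "refactor:" = false := by
        rw [PySem.Str.startswith_eq]
        exact swF "refactor".toList (by decide) (by rw [hk5]; decide)
      have hfn : PySem.Str.find lo ":" = (6 : Int) := by rw [hf, hk5]; decide
      have hweq : PySem.Str.slice lo none (some ((6 : Int))) = "bugfix" := by
        apply String.toList_inj.mp
        rw [show ((6 : Int)) = ((W.length : Int)) from by rw [hk5]; decide, hword, hk5]
      have eg : nc_cats.get? (PySem.Str.slice lo none (some ((6 : Int)))) = some "fixed" := by
        rw [hweq]; rfl
      have hlp : PySem.Str.len "bugfix:" = (7 : Int) := by decide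
      have hplus : ((6 : Int)) + 1 = (7 : Int) := by decide
      simp only [hfn, e0, e1, e2, e3, e4, e5, e6, e7, e8, eg, nc_cleanLoop, hlp, hplus]
      norm_num
    by_cases hk6 : W = "hotfix".toList
    · have e0 : PySem.Str.startswith lo "feat:" = false := by
        rw [PySem.Str.startswith_eq]
        exact swF "feat".toList (by decide) (by rw [hk6]; decide)
      have e1 : PySem.Str.startswith lo "feature:" = false := by
        rw [PySem.Str.startswith_eq]
        exact swF "feature".toList (by decide) (by rw [hk6]; decide)
      have e2 : PySem.Str.startswith lo "add:" = false := by
        rw [PySem.Str.startswith_eq]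
        exact swF "add".toList (by decide) (by rw [hk6]; decide)
      have e3 : PySem.Str.startswith lo "new:" = false := by
        rw [PySem.Str.startswith_eq]
        exact swF "new".toList (by decide) (by rw [hk6]; decide)
      have e4 : PySem.Str.startswith lo "fix:" = false := by
        rw [PySem.Str.startswith_eq]
        exact swF "fix".toList (by decide) (by rw [hk6]; decide)
      have e5 : PySem.Str.startswith lo "bugfix:" = false := by
        rw [PySem.Str.startswith_eq]
        exact swF "bugfix".toList (by decide) (by rw [hk6]; decide)
      have e6 : PySem.Str.startswith lo "hotfix:" = true := by
        rw [PySem.Str.startswith_eq]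
        exact swT "hotfix".toList (by decide) hk6
      have e7 : PySem.Str.startswith lo "chore:" = false := by
        rw [PySem.Str.startswith_eq]
        exact swF "chore".toList (by decide) (by rw [hk6]; decide)
      have e8 : PySem.Str.startswith lo "refactor:" = false := by
        rw [PySem.Str.startswith_eq]
        exact swF "refactor".toList (by decide) (by rw [hk6]; decide)
      have hfn : PySem.Str.find lo ":" = (6 : Int) := by rw [hf, hk6]; decide
      have hweq : PySem.Str.slice lo none (some ((6 : Int))) = "hotfix" := by
        apply String.toList_inj.mp
        rw [show ((6 : Int)) = ((W.length : Int)) from by rw [hk6]; decide, hword, hk6]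
      have eg : nc_cats.get? (PySem.Str.slice lo none (some ((6 : Int)))) = some "fixed" := by
        rw [hweq]; rfl
      have hlp : PySem.Str.len "hotfix:" = (7 : Int) := by decide
      have hplus : ((6 : Int)) + 1 = (7 : Int) := by decide
      simp only [hfn, e0, e1, e2, e3, e4, e5, e6, e7, e8, eg, nc_cleanLoop, hlp, hplus]
      norm_num
    by_cases hk7 : W = "chore".toList
    · have e0 : PySem.Str.startswith lo "feat:" = false := by
        rw [PySem.Str.startswith_eq]
        exact swF "feat".toList (by decide) (by rw [hk7]; decide)
      have e1 : PySem.Str.startswith lo "feature:" = false := by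
        rw [PySem.Str.startswith_eq]
        exact swF "feature".toList (by decide) (by rw [hk7]; decide)
      have e2 : PySem.Str.startswith lo "add:" = false := by
        rw [PySem.Str.startswith_eq]
        exact swF "add".toList (by decide) (by rw [hk7]; decide)
      have e3 : PySem.Str.startswith lo "new:" = false := by
        rw [PySem.Str.startswith_eq]
        exact swF "new".toList (by decide) (by rw [hk7]; decide)
      have e4 : PySem.Str.startswith lo "fix:" = false := by
        rw [PySem.Str.startswith_eq]
        exact swF "fix".toList (by decide) (by rw [hk7]; decide)
      have e5 : PySem.Str.startswith lo "bugfix:" = false := by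
        rw [PySem.Str.startswith_eq]
        exact swF "bugfix".toList (by decide) (by rw [hk7]; decide)
      have e6 : PySem.Str.startswith lo "hotfix:" = false := by
        rw [PySem.Str.startswith_eq]
        exact swF "hotfix".toList (by decide) (by rw [hk7]; decide)
      have e7 : PySem.Str.startswith lo "chore:" = true := by
        rw [PySem.Str.startswith_eq]
        exact swT "chore".toList (by decide) hk7
      have e8 : PySem.Str.startswith lo "refactor:" = false := by
        rw [PySem.Str.startswith_eq]
        exact swF "refactor".toList (by decide) (by rw [hk7]; decide)
      have hfn : PySem.Str.find lo ":" = (5 : Int) := by rw [hf, hk7]; decide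
      have hweq : PySem.Str.slice lo none (some ((5 : Int))) = "chore" := by
        apply String.toList_inj.mp
        rw [show ((5 : Int)) = ((W.length : Int)) from by rw [hk7]; decide, hword, hk7]
      have eg : nc_cats.get? (PySem.Str.slice lo none (some ((5 : Int)))) = some "improved" := by
        rw [hweq]; rfl
      have hlp : PySem.Str.len "chore:" = (6 : Int) := by decide
      have hplus : ((5 : Int)) + 1 = (6 : Int) := by decide
      simp only [hfn, e0, e1, e2, e3, e4, e5, e6, e7, e8, eg, nc_cleanLoop, hlp, hplus]
      norm_num
    by_cases hk8 : W = "refactor".toList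
    · have e0 : PySem.Str.startswith lo "feat:" = false := by
        rw [PySem.Str.startswith_eq]
        exact swF "feat".toList (by decide) (by rw [hk8]; decide)
      have e1 : PySem.Str.startswith lo "feature:" = false := by
        rw [PySem.Str.startswith_eq]
        exact swF "feature".toList (by decide) (by rw [hk8]; decide)
      have e2 : PySem.Str.startswith lo "add:" = false := by
        rw [PySem.Str.startswith_eq]
        exact swF "add".toList (by decide) (by rw [hk8]; decide)
      have e3 : PySem.Str.startswith lo "new:" = false := by
        rw [PySem.Str.startswith_eq]
        exact swF "new".toList (by decide) (by rw [hk8]; decide)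
      have e4 : PySem.Str.startswith lo "fix:" = false := by
        rw [PySem.Str.startswith_eq]
        exact swF "fix".toList (by decide) (by rw [hk8]; decide)
      have e5 : PySem.Str.startswith lo "bugfix:" = false := by
        rw [PySem.Str.startswith_eq]
        exact swF "bugfix".toList (by decide) (by rw [hk8]; decide)
      have e6 : PySem.Str.startswith lo "hotfix:" = false := by
        rw [PySem.Str.startswith_eq]
        exact swF "hotfix".toList (by decide) (by rw [hk8]; decide)
      have e7 : PySem.Str.startswith lo "chore:" = false := by
        rw [PySem.Str.startswith_eq]
        exact swF "chore".toList (by decide) (by rw [hk8]; decide)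
      have e8 : PySem.Str.startswith lo "refactor:" = true := by
        rw [PySem.Str.startswith_eq]
        exact swT "refactor".toList (by decide) hk8
      have hfn : PySem.Str.find lo ":" = (8 : Int) := by rw [hf, hk8]; decide
      have hweq : PySem.Str.slice lo none (some ((8 : Int))) = "refactor" := by
        apply String.toList_inj.mp
        rw [show ((8 : Int)) = ((W.length : Int)) from by rw [hk8]; decide, hword, hk8]
      have eg : nc_cats.get? (PySem.Str.slice lo none (some ((8 : Int)))) = some "improved" := by
        rw [hweq]; rfl
      have hlp : PySem.Str.len "refactor:" = (9 : Int) := by decide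
      have hplus : ((8 : Int)) + 1 = (9 : Int) := by decide
      simp only [hfn, e0, e1, e2, e3, e4, e5, e6, e7, e8, eg, nc_cleanLoop, hlp, hplus]
      norm_num
    · have e0 : PySem.Str.startswith lo "feat:" = false := by
        rw [PySem.Str.startswith_eq]
        exact swF "feat".toList (by decide) hk0
      have e1 : PySem.Str.startswith lo "feature:" = false := by
        rw [PySem.Str.startswith_eq]
        exact swF "feature".toList (by decide) hk1
      have e2 : PySem.Str.startswith lo "add:" = false := by
        rw [PySem.Str.startswith_eq]
        exact swF "add".toList (by decide) hk2
      have e3 : PySem.Str.startswith lo "new:" = false := by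
        rw [PySem.Str.startswith_eq]
        exact swF "new".toList (by decide) hk3
      have e4 : PySem.Str.startswith lo "fix:" = false := by
        rw [PySem.Str.startswith_eq]
        exact swF "fix".toList (by decide) hk4
      have e5 : PySem.Str.startswith lo "bugfix:" = false := by
        rw [PySem.Str.startswith_eq]
        exact swF "bugfix".toList (by decide) hk5
      have e6 : PySem.Str.startswith lo "hotfix:" = false := by
        rw [PySem.Str.startswith_eq]
        exact swF "hotfix".toList (by decide) hk6
      have e7 : PySem.Str.startswith lo "chore:" = false := by
        rw [PySem.Str.startswith_eq]
        exact swF "chore".toList (by decide) hk7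
      have e8 : PySem.Str.startswith lo "refactor:" = false := by
        rw [PySem.Str.startswith_eq]
        exact swF "refactor".toList (by decide) hk8
      have hnn : (0 : Int) ≤ (W.length : Int) := Int.natCast_nonneg _
      have nk0 : ("feat" == PySem.Str.slice lo none (some ((W.length : Int)))) = false := by
        rw [beq_eq_false_iff_ne]
        intro e
        exact hk0 (by rw [← hword, ← e])
      have nk1 : ("feature" == PySem.Str.slice lo none (some ((W.length : Int)))) = false := by
        rw [beq_eq_false_iff_ne]
        intro e
        exact hk1 (by rw [← hword, ← e])
      have nk2 : ("add" == PySem.Str.slice lo none (some ((W.length : Int)))) = false := by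
        rw [beq_eq_false_iff_ne]
        intro e
        exact hk2 (by rw [← hword, ← e])
      have nk3 : ("new" == PySem.Str.slice lo none (some ((W.length : Int)))) = false := by
        rw [beq_eq_false_iff_ne]
        intro e
        exact hk3 (by rw [← hword, ← e])
      have nk4 : ("fix" == PySem.Str.slice lo none (some ((W.length : Int)))) = false := by
        rw [beq_eq_false_iff_ne]
        intro e
        exact hk4 (by rw [← hword, ← e])
      have nk5 : ("bugfix" == PySem.Str.slice lo none (some ((W.length : Int)))) = false := by
        rw [beq_eq_false_iff_ne]
        intro e
        exact hk5 (by rw [← hword, ← e])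
      have nk6 : ("hotfix" == PySem.Str.slice lo none (some ((W.length : Int)))) = false := by
        rw [beq_eq_false_iff_ne]
        intro e
        exact hk6 (by rw [← hword, ← e])
      have nk7 : ("chore" == PySem.Str.slice lo none (some ((W.length : Int)))) = false := by
        rw [beq_eq_false_iff_ne]
        intro e
        exact hk7 (by rw [← hword, ← e])
      have nk8 : ("refactor" == PySem.Str.slice lo none (some ((W.length : Int)))) = false := by
        rw [beq_eq_false_iff_ne]
        intro e
        exact hk8 (by rw [← hword, ← e])
      have eg : nc_cats.get? (PySem.Str.slice lo none (some ((W.length : Int)))) = none := by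
        simp only [show nc_cats = PySem.Dict.mk
            [("feat", "new"), ("feature", "new"), ("add", "new"), ("new", "new"),
             ("fix", "fixed"), ("bugfix", "fixed"), ("hotfix", "fixed"),
             ("chore", "improved"), ("refactor", "improved")] from rfl,
          PySem.Dict.get?_mk_cons, nk0, nk1, nk2, nk3, nk4, nk5, nk6, nk7, nk8]
        rfl
      simp only [hf, e0, e1, e2, e3, e4, e5, e6, e7, e8, eg, nc_cleanLoop, if_pos hnn]
      norm_num

-- ===== VERDICT (by name: the statement is the Claim_ definition above) =====
theorem normalize_commit_spec : Claim_equal_normalize_commit := by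
  intro subject _
  show normalize_commit subject = normalize_commit_alt subject
  exact nc_main subject
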